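-- pv_equiv track=rewrite | github.com/raulfauste/DAA | Practica2/SumaRestaPolinomios.py | SumaResta
-- ===== SOURCE A (Python) =====
-- def SumaResta(a,b,n,m,i,j,sol,flag):
--     if i==n+1 and j==m+1:
--         pass
--     else:
--         if flag==1:
--             if i<n+1 and j<m+1:
--                 sol.append(a[i]+b[j])
--                 SumaResta(a, b, n, m, i+1, j + 1, sol, flag)
--             elif i == n + 1:
--                 sol.append(b[j])
--                 SumaResta(a, b, n, m, i, j + 1, sol, flag)
--             elif j == m + 1:
--                 sol.append(a[i])
--                 SumaResta(a, b, n, m, i + 1, j, sol, flag)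
--         else:
--             if i<n+1 and j<m+1:
--                 sol.append(a[i] - b[j])
--                 SumaResta(a, b, n, m, i+1, j + 1, sol, flag)
--             elif i == n + 1:
--                 sol.append(-b[j])
--                 SumaResta(a, b, n, m, i, j + 1, sol, flag)
--             elif j == m + 1:
--                 sol.append(a[i])
--                 SumaResta(a, b, n, m, i + 1, j, sol, flag)
--     return sol
-- ===== SOURCE B (Python) =====
-- def SumaResta(a, b, n, m, i, j, sol, flag):
--     s = 1 if flag == 1 else -1
--     k = min(n + 1 - i, m + 1 - j)
--     if k > 0:
--         sol.extend(a[p] + s * b[p - i + j] for p in range(i, i + k))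
--         i, j = i + k, j + k
--     if i == n + 1 and j != m + 1:
--         sol.extend(s * b[q] for q in range(j, m + 1))
--     elif j == m + 1 and i != n + 1:
--         sol.extend(a[p] for p in range(i, n + 1))
--     return sol
-- ===== Notes on version B (the rewrite author's own statement) =====
-- stated objective: alternative
-- what changed: Replaces A's one-element-per-call tail recursion with a non-recursive closed-form version that computes the overlap length k = min(n+1-i, m+1-j) once and emits the overlap and the leftover tail as two batched range comprehensions.
import Mathlib
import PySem

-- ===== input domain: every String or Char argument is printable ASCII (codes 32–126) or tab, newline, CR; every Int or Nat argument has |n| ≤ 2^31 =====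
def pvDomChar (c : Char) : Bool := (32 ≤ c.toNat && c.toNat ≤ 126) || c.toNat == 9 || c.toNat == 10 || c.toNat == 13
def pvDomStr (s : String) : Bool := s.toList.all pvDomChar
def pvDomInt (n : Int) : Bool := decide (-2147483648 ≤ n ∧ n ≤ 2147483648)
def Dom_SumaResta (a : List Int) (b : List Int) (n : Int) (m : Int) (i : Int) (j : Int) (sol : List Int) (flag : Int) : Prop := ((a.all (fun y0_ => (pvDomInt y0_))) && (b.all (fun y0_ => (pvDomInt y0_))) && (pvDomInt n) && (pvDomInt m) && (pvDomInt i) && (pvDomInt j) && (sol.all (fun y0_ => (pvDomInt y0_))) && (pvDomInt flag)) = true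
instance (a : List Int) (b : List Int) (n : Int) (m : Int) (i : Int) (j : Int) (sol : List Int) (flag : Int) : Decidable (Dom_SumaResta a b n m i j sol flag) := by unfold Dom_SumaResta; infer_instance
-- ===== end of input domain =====

-- B replaces A's one-element-per-call recursion by a closed-form pass: overlap length k computed
-- once, then two batched range comprehensions (objective: alternative, non-recursive decomposition).
-- Both A and B mutate `sol` in place in Python (append/extend); the claim is about the return value,
-- and B performs the same mutation (it returns the same extended `sol`).

-- ===== PORT A =====
-- A's recursion is not structurally decreasing on inputs where Python raises IndexError
-- (e.g. i == n+1 with j > m+1); the port uses a fuel that is sufficient on every input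
-- satisfying Pre_SumaResta (the recursion performs at most ((n+1-i)+(m+1-j)) steps there),
-- and returns the accumulated `sol` when an index access fails (Python raises IndexError
-- there; such inputs are outside Pre_SumaResta).
def SumaRestaFuel (fuel : Nat) (a : List Int) (b : List Int) (n : Int) (m : Int) (i : Int) (j : Int) (sol : List Int) (flag : Int) : List Int :=
  match fuel with
  | 0 => sol
  | fuel + 1 =>
    if i = n + 1 ∧ j = m + 1 then sol
    else
      if flag = 1 then
        if i < n + 1 ∧ j < m + 1 then
          match PySem.List.pyGet? a i, PySem.List.pyGet? b j with
          | some x, some y => SumaRestaFuel fuel a b n m (i+1) (j+1) (sol ++ [x + y]) flag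
          | _, _ => sol
        else if i = n + 1 then
          match PySem.List.pyGet? b j with
          | some y => SumaRestaFuel fuel a b n m i (j+1) (sol ++ [y]) flag
          | none => sol
        else if j = m + 1 then
          match PySem.List.pyGet? a i with
          | some x => SumaRestaFuel fuel a b n m (i+1) j (sol ++ [x]) flag
          | none => sol
        else sol
      else
        if i < n + 1 ∧ j < m + 1 then
          match PySem.List.pyGet? a i, PySem.List.pyGet? b j with
          | some x, some y => SumaRestaFuel fuel a b n m (i+1) (j+1) (sol ++ [x - y]) flag
          | _, _ => sol
        else if i = n + 1 then
          match PySem.List.pyGet? b j with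
          | some y => SumaRestaFuel fuel a b n m i (j+1) (sol ++ [-y]) flag
          | none => sol
        else if j = m + 1 then
          match PySem.List.pyGet? a i with
          | some x => SumaRestaFuel fuel a b n m (i+1) j (sol ++ [x]) flag
          | none => sol
        else sol

def SumaResta (a : List Int) (b : List Int) (n : Int) (m : Int) (i : Int) (j : Int) (sol : List Int) (flag : Int) : List Int :=
  SumaRestaFuel ((n + 1 - i) + (m + 1 - j)).toNat a b n m i j sol flag

-- ===== PORT B =====
-- `.getD 0` is only reachable on inputs outside Pre_SumaResta (Python B raises IndexError there).
def SumaResta_alt (a : List Int) (b : List Int) (n : Int) (m : Int) (i : Int) (j : Int) (sol : List Int) (flag : Int) : List Int :=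
  let s : Int := if flag = 1 then 1 else -1
  let k : Int := min (n + 1 - i) (m + 1 - j)
  let i' : Int := if k > 0 then i + k else i
  let j' : Int := if k > 0 then j + k else j
  let sol1 : List Int :=
    if k > 0 then
      sol ++ (PySem.List.pyRange i (i + k) 1).map
        (fun p => (PySem.List.pyGet? a p).getD 0 + s * (PySem.List.pyGet? b (p - i + j)).getD 0)
    else sol
  if i' = n + 1 ∧ j' ≠ m + 1 then
    sol1 ++ (PySem.List.pyRange j' (m + 1) 1).map (fun q => s * (PySem.List.pyGet? b q).getD 0)
  else if j' = m + 1 ∧ i' ≠ n + 1 then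
    sol1 ++ (PySem.List.pyRange i' (n + 1) 1).map (fun p => (PySem.List.pyGet? a p).getD 0)
  else sol1

-- ===== PRECONDITION & SPEC =====
-- Pre_ is exactly the set of inputs on which Python A returns (no IndexError, no unbounded
-- recursion): every list index the recursion touches is a valid Python index.
def Pre_SumaResta (a : List Int) (b : List Int) (n : Int) (m : Int) (i : Int) (j : Int) (sol : List Int) (flag : Int) : Prop :=
  ((i < n + 1 ∧ j < m + 1) → (-(a.length : Int) ≤ i ∧ n < (a.length : Int) ∧ -(b.length : Int) ≤ j ∧ m < (b.length : Int))) ∧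
  ((i = n + 1 ∧ j ≠ m + 1) → (j < m + 1 ∧ -(b.length : Int) ≤ j ∧ m < (b.length : Int))) ∧
  ((j = m + 1 ∧ i ≠ n + 1) → (i < n + 1 ∧ -(a.length : Int) ≤ i ∧ n < (a.length : Int)))
instance (a : List Int) (b : List Int) (n : Int) (m : Int) (i : Int) (j : Int) (sol : List Int) (flag : Int) : Decidable (Pre_SumaResta a b n m i j sol flag) := by unfold Pre_SumaResta; infer_instance

def pvWitness_SumaResta : List Int × List Int × Int × Int × Int × Int × List Int × Int :=
  ([1, 2, 3], [4, 5], 2, 1, 0, 0, [], 1)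

def Spec_SumaResta (a : List Int) (b : List Int) (n : Int) (m : Int) (i : Int) (j : Int) (sol : List Int) (flag : Int) (out : List Int) : Prop := out = SumaResta_alt a b n m i j sol flag
instance (a : List Int) (b : List Int) (n : Int) (m : Int) (i : Int) (j : Int) (sol : List Int) (flag : Int) (out : List Int) : Decidable (Spec_SumaResta a b n m i j sol flag out) := by unfold Spec_SumaResta; infer_instance

-- ===== CLAIM (what is proved, stated in full; the proofs are below) =====
def Claim_equal_SumaResta : Prop := ∀ (a : List Int) (b : List Int) (n : Int) (m : Int) (i : Int) (j : Int) (sol : List Int) (flag : Int), Dom_SumaResta a b n m i j sol flag → Pre_SumaResta a b n m i j sol flag → Spec_SumaResta a b n m i j sol flag (SumaResta a b n m i j sol flag)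


-- ===== LEMMAS AND PROOFS =====

-- a list index known to be below a bound n that is below the length never fails
theorem pyGet_total (xs : List Int) (i n : Int) (h1 : -(xs.length : Int) ≤ i) (h2 : i ≤ n)
    (h3 : n < (xs.length : Int)) : ∃ x, PySem.List.pyGet? xs i = some x := by
  cases hg : PySem.List.pyGet? xs i with
  | some x => exact ⟨x, rfl⟩
  | none => rw [PySem.List.pyGet?_eq_none_iff] at hg; exact absurd ⟨h1, by omega⟩ hg

-- B returns sol unchanged on the terminal states of A's recursion
theorem alt_base (a b : List Int) (n m i j : Int) (sol : List Int) (flag : Int)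
    (h1 : ¬ (i < n + 1 ∧ j < m + 1)) (h2 : i = n + 1 ↔ j = m + 1) :
    SumaResta_alt a b n m i j sol flag = sol := by
  have hk : ¬ (min (n + 1 - i) (m + 1 - j) > 0) := by omega
  simp only [SumaResta_alt, if_neg hk]
  have c1 : ¬ (i = n + 1 ∧ j ≠ m + 1) := by tauto
  have c2 : ¬ (j = m + 1 ∧ i ≠ n + 1) := by tauto
  simp [c1, c2]

-- peeling one element off B's b-tail comprehension
theorem alt_tailb (a b : List Int) (n m i j : Int) (sol : List Int) (flag : Int)
    (hi : i = n + 1) (hj : j < m + 1) :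
    SumaResta_alt a b n m i j sol flag =
      SumaResta_alt a b n m i (j + 1)
        (sol ++ [(if flag = 1 then (1:Int) else -1) * (PySem.List.pyGet? b j).getD 0]) flag := by
  have hk : ¬ (min (n + 1 - i) (m + 1 - j) > 0) := by omega
  have hk2 : ¬ (min (n + 1 - i) (m + 1 - (j + 1)) > 0) := by omega
  simp only [SumaResta_alt, if_neg hk, if_neg hk2]
  have c1 : (i = n + 1 ∧ j ≠ m + 1) := ⟨hi, by omega⟩
  rw [if_pos c1, PySem.List.pyRange_one_cons hj]
  by_cases hj2 : j + 1 = m + 1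
  · have c1' : ¬ (i = n + 1 ∧ j + 1 ≠ m + 1) := by tauto
    have c2' : ¬ (j + 1 = m + 1 ∧ i ≠ n + 1) := by tauto
    rw [if_neg c1', if_neg c2', hj2, PySem.List.pyRange_one_eq_nil (by omega)]
    simp
  · have c1' : (i = n + 1 ∧ j + 1 ≠ m + 1) := ⟨hi, hj2⟩
    rw [if_pos c1']
    simp

-- peeling one element off B's a-tail comprehension
theorem alt_taila (a b : List Int) (n m i j : Int) (sol : List Int) (flag : Int)
    (hj : j = m + 1) (hi : i < n + 1) :
    SumaResta_alt a b n m i j sol flag =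
      SumaResta_alt a b n m (i + 1) j (sol ++ [(PySem.List.pyGet? a i).getD 0]) flag := by
  have hk : ¬ (min (n + 1 - i) (m + 1 - j) > 0) := by omega
  have hk2 : ¬ (min (n + 1 - (i + 1)) (m + 1 - j) > 0) := by omega
  simp only [SumaResta_alt, if_neg hk, if_neg hk2]
  have c1 : ¬ (i = n + 1 ∧ j ≠ m + 1) := by tauto
  have c2 : (j = m + 1 ∧ i ≠ n + 1) := ⟨hj, by omega⟩
  rw [if_neg c1, if_pos c2, PySem.List.pyRange_one_cons hi]
  by_cases hi2 : i + 1 = n + 1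
  · have c1' : ¬ (i + 1 = n + 1 ∧ j ≠ m + 1) := by tauto
    have c2' : ¬ (j = m + 1 ∧ i + 1 ≠ n + 1) := by tauto
    rw [if_neg c1', if_neg c2', hi2, PySem.List.pyRange_one_eq_nil (by omega)]
    simp
  · have c1' : ¬ (i + 1 = n + 1 ∧ j ≠ m + 1) := by tauto
    have c2' : (j = m + 1 ∧ i + 1 ≠ n + 1) := ⟨hj, hi2⟩
    rw [if_neg c1', if_pos c2']
    simp

-- peeling one element off B's overlap comprehension
theorem alt_step (a b : List Int) (n m i j : Int) (sol : List Int) (flag : Int)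
    (hi : i < n + 1) (hj : j < m + 1) :
    SumaResta_alt a b n m i j sol flag =
      SumaResta_alt a b n m (i + 1) (j + 1)
        (sol ++ [(PySem.List.pyGet? a i).getD 0 +
          (if flag = 1 then (1:Int) else -1) * (PySem.List.pyGet? b j).getD 0]) flag := by
  have hK0 : min (n + 1 - i) (m + 1 - j) > 0 := by omega
  by_cases hK1 : min (n + 1 - i) (m + 1 - j) = 1
  · have hk2 : ¬ (min (n + 1 - (i + 1)) (m + 1 - (j + 1)) > 0) := by omega
    simp only [SumaResta_alt, if_neg hk2, hK1]
    rw [PySem.List.pyRange_one_singleton]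
    simp
  · have hK2 : min (n + 1 - (i + 1)) (m + 1 - (j + 1)) = min (n + 1 - i) (m + 1 - j) - 1 := by
      omega
    have hK2' : min (n + 1 - i) (m + 1 - j) - 1 > 0 := by omega
    simp only [SumaResta_alt, if_pos hK0, hK2, if_pos hK2']
    have e1 : i + 1 + (min (n + 1 - i) (m + 1 - j) - 1) = i + min (n + 1 - i) (m + 1 - j) := by
      ring
    have e2 : j + 1 + (min (n + 1 - i) (m + 1 - j) - 1) = j + min (n + 1 - i) (m + 1 - j) := by
      ring
    rw [e1, e2]
    have hf : (fun p => (PySem.List.pyGet? a p).getD 0 +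
        (if flag = 1 then (1:Int) else -1) * (PySem.List.pyGet? b (p - (i + 1) + (j + 1))).getD 0) =
        (fun p => (PySem.List.pyGet? a p).getD 0 +
        (if flag = 1 then (1:Int) else -1) * (PySem.List.pyGet? b (p - i + j)).getD 0) := by
      funext p
      have hp : p - (i + 1) + (j + 1) = p - i + j := by ring
      rw [hp]
    rw [hf, PySem.List.pyRange_one_cons (by omega : i < i + min (n + 1 - i) (m + 1 - j))]
    simp

-- main induction: with enough fuel, A's recursion computes B's closed form
theorem fuel_eq (a b : List Int) (n m : Int) (flag : Int) (fuel : Nat) :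
    ∀ (i j : Int) (sol : List Int), Pre_SumaResta a b n m i j sol flag →
      ((n + 1 - i) + (m + 1 - j)).toNat ≤ fuel →
      SumaRestaFuel fuel a b n m i j sol flag = SumaResta_alt a b n m i j sol flag := by
  induction fuel with
  | zero =>
    intro i j sol hpre hf
    obtain ⟨P1, P2, P3⟩ := hpre
    have h1 : ¬ (i < n + 1 ∧ j < m + 1) := by omega
    have h2 : (i = n + 1 ↔ j = m + 1) := by
      constructor
      · intro h; by_contra h'; have := P2 ⟨h, h'⟩; omega
      · intro h; by_contra h'; have := P3 ⟨h, h'⟩; omega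
    exact (alt_base a b n m i j sol flag h1 h2).symm
  | succ fuel IH =>
    intro i j sol hpre hf
    by_cases hdone : i = n + 1 ∧ j = m + 1
    · rw [alt_base a b n m i j sol flag (by omega) (by tauto)]
      simp only [SumaRestaFuel, if_pos hdone]
    · by_cases hlt : i < n + 1 ∧ j < m + 1
      · obtain ⟨ha1, ha2, hb1, hb2⟩ := hpre.1 hlt
        obtain ⟨x, hgA⟩ := pyGet_total a i n ha1 (by omega) ha2
        obtain ⟨y, hgB⟩ := pyGet_total b j m hb1 (by omega) hb2
        have hpre' : Pre_SumaResta a b n m (i + 1) (j + 1) sol flag := by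
          unfold Pre_SumaResta at *; omega
        have hstep := alt_step a b n m i j sol flag hlt.1 hlt.2
        rw [hgA, hgB] at hstep
        simp only [Option.getD_some] at hstep
        by_cases hflag : flag = 1
        · rw [if_pos hflag, one_mul] at hstep
          simp only [SumaRestaFuel, if_neg hdone, if_pos hflag, if_pos hlt, hgA, hgB]
          rw [hstep]
          exact IH (i + 1) (j + 1) (sol ++ [x + y]) hpre' (by omega)
        · rw [if_neg hflag, neg_one_mul, ← sub_eq_add_neg] at hstep
          simp only [SumaRestaFuel, if_neg hdone, if_neg hflag, if_pos hlt, hgA, hgB]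
          rw [hstep]
          exact IH (i + 1) (j + 1) (sol ++ [x - y]) hpre' (by omega)
      · by_cases hi : i = n + 1
        · have hj' : j ≠ m + 1 := fun h => hdone ⟨hi, h⟩
          obtain ⟨hjlt, hb1, hb2⟩ := hpre.2.1 ⟨hi, hj'⟩
          obtain ⟨y, hgB⟩ := pyGet_total b j m hb1 (by omega) hb2
          have hpre' : Pre_SumaResta a b n m i (j + 1) sol flag := by
            unfold Pre_SumaResta at *; omega
          have hstep := alt_tailb a b n m i j sol flag hi hjlt
          rw [hgB] at hstep
          simp only [Option.getD_some] at hstep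
          by_cases hflag : flag = 1
          · rw [if_pos hflag, one_mul] at hstep
            simp only [SumaRestaFuel, if_neg hdone, if_pos hflag, if_neg hlt, if_pos hi, hgB]
            rw [hstep]
            exact IH i (j + 1) (sol ++ [y]) hpre' (by omega)
          · rw [if_neg hflag, neg_one_mul] at hstep
            simp only [SumaRestaFuel, if_neg hdone, if_neg hflag, if_neg hlt, if_pos hi, hgB]
            rw [hstep]
            exact IH i (j + 1) (sol ++ [-y]) hpre' (by omega)
        · by_cases hj : j = m + 1
          · obtain ⟨hilt, ha1, ha2⟩ := hpre.2.2 ⟨hj, hi⟩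
            obtain ⟨x, hgA⟩ := pyGet_total a i n ha1 (by omega) ha2
            have hpre' : Pre_SumaResta a b n m (i + 1) j sol flag := by
              unfold Pre_SumaResta at *; omega
            have hstep := alt_taila a b n m i j sol flag hj hilt
            rw [hgA] at hstep
            simp only [Option.getD_some] at hstep
            rw [hstep]
            by_cases hflag : flag = 1
            · simp only [SumaRestaFuel, if_neg hdone, if_pos hflag, if_neg hlt, if_neg hi,
                if_pos hj, hgA]
              exact IH (i + 1) j (sol ++ [x]) hpre' (by omega)
            · simp only [SumaRestaFuel, if_neg hdone, if_neg hflag, if_neg hlt, if_neg hi,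
                if_pos hj, hgA]
              exact IH (i + 1) j (sol ++ [x]) hpre' (by omega)
          · rw [alt_base a b n m i j sol flag hlt ⟨fun h => absurd h hi, fun h => absurd h hj⟩]
            by_cases hflag : flag = 1
            · simp only [SumaRestaFuel, if_neg hdone, if_pos hflag, if_neg hlt, if_neg hi,
                if_neg hj]
            · simp only [SumaRestaFuel, if_neg hdone, if_neg hflag, if_neg hlt, if_neg hi,
                if_neg hj]

-- ===== VERDICT (by name: the statement is the Claim_ definition above) =====
theorem SumaResta_spec : Claim_equal_SumaResta := by
  intro a b n m i j sol flag _ hpre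
  unfold Spec_SumaResta SumaResta
  exact fuel_eq a b n m flag _ i j sol hpre le_rfl
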